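-- pv_equiv track=rewrite | github.com/grawlixes/jane | finished/hooks-9/gen.py | genAllRows
-- ===== SOURCE A (Python) =====
-- from math import gcd
-- from functools import reduce
--
-- def genAllRows(target, n, allowed):
--     # generate all possible rows of length n
--     # of numbers [1, n], such that the gcd of the
--     # concatenation of each unique number is equal
--     # to target
--
--     ret = set()
--     curNums = []
--     cur = []
--     def check(nums, target, final):
--         if final:
--             return len(nums) == 0 or reduce(lambda x,y: gcd(x, y), nums) == target
--         else:
--             return all(num % target == 0 for num in nums)
--
--     def recurse(i, num):
--         if i == n:
--             if (num != 0):
--                 curNums.append(num)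
--             if check(curNums, target, True):
--                 ret.add(''.join(cur))
--             if (num != 0):
--                 curNums.pop()
--         else:
--             # blank here
--             if num == 0 or num % target == 0:
--                 if num != 0:
--                     curNums.append(num)
--                 if check(curNums, target, False):
--                     cur.append(" ")
--                     recurse(i + 1, 0)
--                     cur.pop()
--                 if num != 0:
--                     curNums.pop()
--
--             for j in range(1, n + 1):
--                 cur.append(str(j))
--                 recurse(i + 1, num * 10 + j)
--                 cur.pop()
--     recurse(0, 0)
--     return ret
-- ===== SOURCE B (Python) =====
-- from math import gcd
-- from functools import reduce
--
-- def genAllRows(target, n, allowed):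
--     # Flat generate-then-filter: expand all (n+1)^n cell combinations level by
--     # level (blank first, then 1..n), threading (string, committed numbers,
--     # current number) through each partial row, then keep the rows whose
--     # committed numbers are empty or gcd-reduce to target.
--     cells = [None] + list(range(1, n + 1))
--     partials = [("", [], 0)]
--     for _ in range(n):
--         nxt = []
--         for s, nums, num in partials:
--             for c in cells:
--                 if c is None:
--                     nxt.append((s + " ", nums + [num] if num != 0 else nums, 0))
--                 else:
--                     nxt.append((s + str(c), nums, num * 10 + c))
--         partials = nxt
--     ret = set()
--     for s, nums, num in partials:
--         if num != 0:
--             nums = nums + [num]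
--         if not nums or reduce(lambda x, y: gcd(x, y), nums) == target:
--             ret.add(s)
--     return ret
-- ===== Notes on version B (the rewrite author's own statement) =====
-- stated objective: alternative
-- what changed: Replaces A's pruned recursive DFS over shared mutable cur/curNums state with a flat breadth-first generate-then-filter: all (n+1)^n cell combinations are built level by level threading (string, committed numbers, running number), then rows are kept iff their numbers are empty or gcd-reduce to target.
import Mathlib
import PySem

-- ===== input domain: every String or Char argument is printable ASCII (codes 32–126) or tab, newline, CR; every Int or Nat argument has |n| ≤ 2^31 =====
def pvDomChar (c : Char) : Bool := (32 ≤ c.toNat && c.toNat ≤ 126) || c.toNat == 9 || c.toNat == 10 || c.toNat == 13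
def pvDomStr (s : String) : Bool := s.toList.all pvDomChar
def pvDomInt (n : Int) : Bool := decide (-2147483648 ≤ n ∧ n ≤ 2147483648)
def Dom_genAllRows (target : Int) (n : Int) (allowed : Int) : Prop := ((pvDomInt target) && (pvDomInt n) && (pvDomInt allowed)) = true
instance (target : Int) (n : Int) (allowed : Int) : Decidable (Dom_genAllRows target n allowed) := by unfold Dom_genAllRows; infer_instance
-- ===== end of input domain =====

-- B replaces A's pruned recursive DFS (mutable cur/curNums state) by a flat
-- breadth-first generate-then-filter enumeration of all cell combinations;
-- objective: alternative (same exponential cost, no pruning, no recursion).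

-- ===== PORT A =====
-- check(nums, target, final); reduce(gcd, …) is the foldl over the tail from the head
def pyCheckA (nums : List Int) (target : Int) (final : Bool) : Bool :=
  if final then
    nums.length == 0 ||
      (match nums with
       | [] => true
       | h :: t => t.foldl (fun x y => ((Int.gcd x y : Nat) : Int)) h == target)
  else
    nums.all (fun num => PySem.Int.mod num target == 0)

-- recurse(i, num): fuel k = n - i; cur / curNums / ret are threaded functionally
def recurseA (target : Int) (n : Int) : Nat → Int → List String → List Int → List String → List String
  | 0, num, cur, curNums, ret =>
      let curNums' := if num != 0 then curNums ++ [num] else curNums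
      if pyCheckA curNums' target true then PySem.Set.add ret (PySem.Str.join "" cur) else ret
  | k+1, num, cur, curNums, ret =>
      let ret1 :=
        if num == 0 || PySem.Int.mod num target == 0 then
          let curNums' := if num != 0 then curNums ++ [num] else curNums
          if pyCheckA curNums' target false then
            recurseA target n k 0 (cur ++ [" "]) curNums' ret
          else ret
        else ret
      (PySem.List.pyRange 1 (n+1) 1).foldl
        (fun r j => recurseA target n k (num * 10 + j) (cur ++ [PySem.Int.toStr j]) curNums r) ret1

def genAllRows (target : Int) (n : Int) (allowed : Int) : List String :=
  recurseA target n n.toNat 0 [] [] PySem.Set.empty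

-- ===== PORT B =====
-- one expansion round: every partial row × every cell (blank first, then 1..n)
def stepB (cells : List (Option Int)) (ps : List (String × List Int × Int)) :
    List (String × List Int × Int) :=
  ps.flatMap (fun p => cells.map (fun c =>
    match c with
    | none => (p.1 ++ " ", if p.2.2 != 0 then p.2.1 ++ [p.2.2] else p.2.1, (0 : Int))
    | some j => (p.1 ++ PySem.Int.toStr j, p.2.1, p.2.2 * 10 + j)))

def genAllRows_alt (target : Int) (n : Int) (allowed : Int) : List String :=
  let cells : List (Option Int) := none :: (PySem.List.pyRange 1 (n+1) 1).map some
  let partials := (PySem.List.pyRange 0 n 1).foldl (fun ps _ => stepB cells ps) [(("" : String), ([] : List Int), (0 : Int))]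
  partials.foldl (fun (ret : List String) (p : String × List Int × Int) =>
    let nums := if p.2.2 != 0 then p.2.1 ++ [p.2.2] else p.2.1
    if nums.length == 0 ||
        (match nums with
         | [] => true
         | h :: t => t.foldl (fun x y => ((Int.gcd x y : Nat) : Int)) h == target) then
      PySem.Set.add ret p.1
    else ret) PySem.Set.empty

-- ===== PRECONDITION & SPEC =====
-- Pre_ excludes n < 0 (A's recursion never terminates: RecursionError) and
-- target = 0 with n ≥ 2 (A evaluates num % 0: ZeroDivisionError).
def Pre_genAllRows (target : Int) (n : Int) (allowed : Int) : Prop :=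
  0 ≤ n ∧ (target ≠ 0 ∨ n ≤ 1)
instance (target : Int) (n : Int) (allowed : Int) : Decidable (Pre_genAllRows target n allowed) := by
  unfold Pre_genAllRows; infer_instance
def pvWitness_genAllRows : Int × Int × Int := (2, 3, 0)

def Spec_genAllRows (target : Int) (n : Int) (allowed : Int) (out : List String) : Prop := out = genAllRows_alt target n allowed
instance (target : Int) (n : Int) (allowed : Int) (out : List String) : Decidable (Spec_genAllRows target n allowed out) := by unfold Spec_genAllRows; infer_instance

-- ===== CLAIM (what is proved, stated in full; the proofs are below) =====
def Claim_equal_genAllRows : Prop := ∀ (target : Int) (n : Int) (allowed : Int), Dom_genAllRows target n allowed → Pre_genAllRows target n allowed → Spec_genAllRows target n allowed (genAllRows target n allowed)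

-- ===== LEMMAS AND PROOFS =====

-- committed numbers after finalizing the running number
def finNums (num : Int) (nums : List Int) : List Int :=
  if num != 0 then nums ++ [num] else nums

-- emitted suffixes of A's pruned DFS, in traversal order (cur/ret abstracted away)
def emitA (target : Int) (n : Int) : Nat → Int → List Int → List String
  | 0, num, nums => if pyCheckA (finNums num nums) target true then [""] else []
  | k+1, num, nums =>
      (if (num == 0 || PySem.Int.mod num target == 0) &&
          pyCheckA (finNums num nums) target false then
        (emitA target n k 0 (finNums num nums)).map (fun s => " " ++ s)
      else []) ++
      (PySem.List.pyRange 1 (n+1) 1).flatMap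
        (fun j => (emitA target n k (num * 10 + j) nums).map (fun s => PySem.Int.toStr j ++ s))

-- emitted suffixes of B's unpruned enumeration, same order, no pruning
def emitB (target : Int) (n : Int) : Nat → Int → List Int → List String
  | 0, num, nums => if pyCheckA (finNums num nums) target true then [""] else []
  | k+1, num, nums =>
      (emitB target n k 0 (finNums num nums)).map (fun s => " " ++ s) ++
      (PySem.List.pyRange 1 (n+1) 1).flatMap
        (fun j => (emitB target n k (num * 10 + j) nums).map (fun s => PySem.Int.toStr j ++ s))

-- B-side iterate (front-peeling form of the foldl over range(n))
def applyN (cells : List (Option Int)) : Nat → List (String × List Int × Int) → List (String × List Int × Int)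
  | 0, ps => ps
  | k+1, ps => applyN cells k (stepB cells ps)

theorem inter_nil_flatten (l : List (List Char)) : List.intercalate [] l = l.flatten := by
  induction l with
  | nil => rfl
  | cons a l ih =>
    cases l with
    | nil => simp [List.intercalate]
    | cons b r =>
      simp only [List.intercalate, List.intersperse] at *
      simp_all

theorem join_append_singleton (cur : List String) (x : String) :
    PySem.Str.join "" (cur ++ [x]) = PySem.Str.join "" cur ++ x := by
  simp only [PySem.Str.join, String.toList_empty, List.map_append, List.map_cons, List.map_nil]
  show String.ofList (List.intercalate [] _) = String.ofList (List.intercalate [] _) ++ x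
  rw [inter_nil_flatten, inter_nil_flatten, List.flatten_append]
  simp [String.ofList_append, String.ofList_toList]

-- fold of add over a map that prepends: reassociate the prefix
theorem foldl_add_map_pre (l : List String) (a b : String) (ret : List String) :
    ((l.map (fun s => b ++ s)).foldl (fun r s => PySem.Set.add r (a ++ s)) ret)
      = l.foldl (fun r s => PySem.Set.add r ((a ++ b) ++ s)) ret := by
  rw [List.foldl_map]
  exact PySem.List.foldl_congr_mem l _ _ ret (fun acc x _ => by rw [String.append_assoc])

theorem gcdfold_dvd (t : List Int) :
    ∀ (h m : Int), m ∈ h :: t → (t.foldl (fun x y => ((Int.gcd x y : Nat) : Int)) h) ∣ m := by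
  induction t with
  | nil => intro h m hm; simp at hm; simp [hm]
  | cons y t ih =>
    intro h m hm
    have hg : (List.foldl (fun x y => ((Int.gcd x y : Nat) : Int)) ((Int.gcd h y : Nat) : Int) t)
        ∣ ((Int.gcd h y : Nat) : Int) := ih _ _ (List.mem_cons.2 (Or.inl rfl))
    rcases List.mem_cons.1 hm with rfl | hm'
    · simpa using dvd_trans hg (Int.gcd_dvd_left m y)
    · rcases List.mem_cons.1 hm' with rfl | hm''
      · simpa using dvd_trans hg (Int.gcd_dvd_right h m)
      · simpa using ih _ _ (List.mem_cons.2 (Or.inr hm''))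

theorem mem_finNums (num m : Int) (nums : List Int) (hm : m ∈ nums) : m ∈ finNums num nums := by
  unfold finNums; split <;> simp [hm]

theorem pyCheckA_final_false (nums : List Int) (target m : Int) (hm : m ∈ nums)
    (hd : ¬ target ∣ m) : pyCheckA nums target true = false := by
  cases nums with
  | nil => simp at hm
  | cons h t =>
    simp only [pyCheckA]
    simp only [List.length_cons]
    have : (t.foldl (fun x y => ((Int.gcd x y : Nat) : Int)) h == target) = false := by
      rw [beq_eq_false_iff_ne]
      intro hfold
      exact hd (hfold ▸ gcdfold_dvd t h m hm)
    simp [this]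

theorem emitB_nil (target n : Int) (k : Nat) :
    ∀ (num : Int) (nums : List Int) (m : Int), m ∈ nums → ¬ target ∣ m →
      emitB target n k num nums = [] := by
  induction k with
  | zero =>
    intro num nums m hm hd
    simp [emitB, pyCheckA_final_false (finNums num nums) target m (mem_finNums num m nums hm) hd]
  | succ k ih =>
    intro num nums m hm hd
    simp only [emitB, List.append_eq_nil_iff]
    constructor
    · rw [ih 0 (finNums num nums) m (mem_finNums num m nums hm) hd]; rfl
    · rw [List.flatMap_eq_nil_iff]
      intro x hx
      rw [ih _ nums m hm hd]
      rfl

theorem emitA_eq_emitB (target n : Int) (ht : target ≠ 0) (k : Nat) :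
    ∀ (num : Int) (nums : List Int), emitA target n k num nums = emitB target n k num nums := by
  induction k with
  | zero => intro num nums; rfl
  | succ k ih =>
    intro num nums
    simp only [emitA, emitB]
    congr 1
    · by_cases hg : ((num == 0 || PySem.Int.mod num target == 0) &&
          pyCheckA (finNums num nums) target false) = true
      · rw [if_pos hg, ih]
      · rw [if_neg hg]
        rcases Bool.and_eq_false_iff.1 (Bool.not_eq_true _ ▸ hg) with h1 | h2
        · -- num ≠ 0 and num % target ≠ 0: num is a committed non-divisible number
          rcases Bool.or_eq_false_iff.1 h1 with ⟨ha, hb⟩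
          have hnum0 : num ≠ 0 := by simpa using ha
          have hnd : ¬ target ∣ num := by
            intro hdvd
            have := (PySem.Int.mod_eq_zero_iff_dvd num target).2 hdvd
            simp [this] at hb
          have hmem : num ∈ finNums num nums := by
            unfold finNums; simp [hnum0]
          rw [emitB_nil target n k 0 (finNums num nums) num hmem hnd]
          rfl
        · -- some committed number is not divisible by target
          have : ∃ m ∈ finNums num nums, ¬ ((PySem.Int.mod m target == 0) = true) := by
            by_contra hall
            push_neg at hall
            have : pyCheckA (finNums num nums) target false = true := by
              simp only [pyCheckA, if_neg (by simp : ¬ false = true)]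
              rw [List.all_eq_true]
              intro x hx; exact hall x hx
            simp [this] at h2
          rcases this with ⟨m, hmmem, hmnd⟩
          have hnd : ¬ target ∣ m := by
            intro hdvd
            exact hmnd (by simp [(PySem.Int.mod_eq_zero_iff_dvd m target).2 hdvd])
          rw [emitB_nil target n k 0 (finNums num nums) m hmmem hnd]
          rfl
    · apply List.flatMap_congr
      intro j _
      rw [ih]

theorem recurseA_eq_foldl_emitA (target n : Int) (k : Nat) :
    ∀ (num : Int) (cur : List String) (curNums : List Int) (ret : List String),
      recurseA target n k num cur curNums ret =
        (emitA target n k num curNums).foldl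
          (fun r s => PySem.Set.add r (PySem.Str.join "" cur ++ s)) ret := by
  induction k with
  | zero =>
    intro num cur curNums ret
    simp only [recurseA, emitA, finNums]
    split <;> split <;> simp [String.append_empty]
  | succ k ih =>
    intro num cur curNums ret
    simp only [recurseA, emitA]
    rw [List.foldl_append]
    have hblank :
        (if ((num == 0 || PySem.Int.mod num target == 0) &&
              pyCheckA (finNums num curNums) target false) = true then
            (emitA target n k 0 (finNums num curNums)).map (fun s => " " ++ s)
          else []).foldl (fun r s => PySem.Set.add r (PySem.Str.join "" cur ++ s)) ret
          = (if (num == 0 || PySem.Int.mod num target == 0) = true then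
              if pyCheckA (finNums num curNums) target false = true then
                recurseA target n k 0 (cur ++ [" "]) (finNums num curNums) ret
              else ret
            else ret) := by
      by_cases h1 : (num == 0 || PySem.Int.mod num target == 0) = true
      · by_cases h2 : pyCheckA (finNums num curNums) target false = true
        · rw [if_pos (by rw [h1, h2]; rfl), if_pos h1, if_pos h2]
          rw [foldl_add_map_pre, ih, join_append_singleton]
        · rw [if_neg (by simp [h2]), if_pos h1, if_neg h2]
          rfl
      · rw [if_neg (by simp [h1]), if_neg h1]
        rfl
    have hloop : ∀ (js : List Int) (r : List String),
        js.foldl (fun r j =>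
            recurseA target n k (num * 10 + j) (cur ++ [PySem.Int.toStr j]) curNums r) r
          = (js.flatMap (fun j =>
              (emitA target n k (num * 10 + j) curNums).map (fun s => PySem.Int.toStr j ++ s))).foldl
              (fun r s => PySem.Set.add r (PySem.Str.join "" cur ++ s)) r := by
      intro js
      induction js with
      | nil => intro r; rfl
      | cons j js ihl =>
        intro r
        simp only [List.foldl_cons, List.flatMap_cons, List.foldl_append]
        rw [ihl, ih, foldl_add_map_pre, join_append_singleton]
    rw [hloop, hblank]
    have : finNums num curNums = (if (num != 0) = true then curNums ++ [num] else curNums) := rfl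
    rw [← this]

theorem foldl_stepB_const (cells : List (Option Int)) (l : List Int) :
    ∀ ps, l.foldl (fun ps _ => stepB cells ps) ps = applyN cells l.length ps := by
  induction l with
  | nil => intro ps; rfl
  | cons x l ih => intro ps; simp only [List.foldl_cons, List.length_cons, applyN]; exact ih _

-- rows emitted below a partial p, with p's string prefixed
def outList (target : Int) (n : Int) (k : Nat) (p : String × List Int × Int) : List String :=
  (emitB target n k p.2.2 p.2.1).map (fun s => p.1 ++ s)

-- one stepB round on a single partial expands its outList by one level
theorem flatMap_outList_step (target n : Int) (k : Nat) (p : String × List Int × Int) :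
    (List.map (fun c =>
        match c with
        | none => (p.1 ++ " ", if p.2.2 != 0 then p.2.1 ++ [p.2.2] else p.2.1, (0 : Int))
        | some j => (p.1 ++ PySem.Int.toStr j, p.2.1, p.2.2 * 10 + j))
        (none :: (PySem.List.pyRange 1 (n+1) 1).map some)).flatMap (outList target n k)
      = (emitB target n (k+1) p.2.2 p.2.1).map (fun s => p.1 ++ s) := by
  rw [List.map_cons, List.flatMap_cons]
  show outList target n k (p.1 ++ " ", finNums p.2.2 p.2.1, 0) ++ _ = _
  conv_rhs => rw [emitB]
  rw [List.map_append]
  congr 1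
  · simp only [outList, List.map_map]
    apply List.map_congr_left
    intro a _
    show (p.1 ++ " ") ++ a = p.1 ++ (" " ++ a)
    rw [String.append_assoc]
  · rw [List.map_map, List.flatMap_map, List.map_flatMap]
    apply List.flatMap_congr
    intro j _
    show outList target n k (p.1 ++ PySem.Int.toStr j, p.2.1, p.2.2 * 10 + j) = _
    simp only [outList, List.map_map]
    apply List.map_congr_left
    intro a _
    show (p.1 ++ PySem.Int.toStr j) ++ a = p.1 ++ (PySem.Int.toStr j ++ a)
    rw [String.append_assoc]

theorem foldl_outList_flatMap (target n : Int) (k : Nat) (qs : List (String × List Int × Int)) :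
    ∀ acc, qs.foldl (fun ret p => (outList target n k p).foldl (fun r s => PySem.Set.add r s) ret) acc
      = (qs.flatMap (outList target n k)).foldl (fun r s => PySem.Set.add r s) acc := by
  induction qs with
  | nil => intro acc; rfl
  | cons q qs ih =>
    intro acc
    simp only [List.foldl_cons, List.flatMap_cons, List.foldl_append, ih]

-- B's final filter-fold over k expansion rounds, as a fold of emitted rows
theorem applyN_foldl_emitB (target n : Int) (k : Nat) :
    ∀ (ps : List (String × List Int × Int)) (ret : List String),
      (applyN (none :: (PySem.List.pyRange 1 (n+1) 1).map some) k ps).foldl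
        (fun (ret : List String) (p : String × List Int × Int) =>
          let nums := if p.2.2 != 0 then p.2.1 ++ [p.2.2] else p.2.1
          if nums.length == 0 ||
              (match nums with
               | [] => true
               | h :: t => t.foldl (fun x y => ((Int.gcd x y : Nat) : Int)) h == target) then
            PySem.Set.add ret p.1
          else ret) ret
      = ps.foldl (fun ret p =>
          (outList target n k p).foldl (fun r s => PySem.Set.add r s) ret) ret := by
  induction k with
  | zero =>
    intro ps ret
    simp only [applyN]
    apply PySem.List.foldl_congr_mem
    intro acc p _
    show (if pyCheckA (finNums p.2.2 p.2.1) target true = true then PySem.Set.add acc p.1 else acc)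
      = (outList target n 0 p).foldl (fun r s => PySem.Set.add r s) acc
    simp only [outList, emitB]
    split
    · simp [String.append_empty]
    · rfl
  | succ k ih =>
    intro ps ret
    show (applyN _ k (stepB _ ps)).foldl _ ret = _
    rw [ih]
    simp only [stepB, List.foldl_flatMap]
    apply PySem.List.foldl_congr_mem
    intro acc p _
    rw [foldl_outList_flatMap, flatMap_outList_step]
    rfl

theorem altB_eq_foldl_emitB (target n allowed : Int) (hn : 0 ≤ n) :
    genAllRows_alt target n allowed =
      (emitB target n n.toNat 0 []).foldl (fun r s => PySem.Set.add r s) PySem.Set.empty := by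
  simp only [genAllRows_alt]
  rw [foldl_stepB_const, PySem.List.length_pyRange_one]
  have h0 : (n - 0).toNat = n.toNat := by omega
  rw [h0, applyN_foldl_emitB]
  simp only [List.foldl_cons, List.foldl_nil, outList, List.foldl_map]
  apply PySem.List.foldl_congr_mem
  intro acc s _
  rw [String.empty_append]

-- ===== VERDICT (by name: the statement is the Claim_ definition above) =====
theorem genAllRows_spec : Claim_equal_genAllRows := by
  intro target n allowed _ hpre
  obtain ⟨hn, htn⟩ := hpre
  show genAllRows target n allowed = genAllRows_alt target n allowed
  by_cases ht : target = 0
  case neg =>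
    rw [genAllRows, recurseA_eq_foldl_emitA, altB_eq_foldl_emitB target n allowed hn]
    rw [emitA_eq_emitB target n ht]
    apply PySem.List.foldl_congr_mem
    intro acc s _
    show PySem.Set.add acc (PySem.Str.join "" [] ++ s) = PySem.Set.add acc s
    rw [show PySem.Str.join "" ([] : List String) = "" from rfl, String.empty_append]
  case pos =>
    subst ht
    have hn1 : n ≤ 1 := by
      rcases htn with h | h
      · exact absurd rfl h
      · exact h
    interval_cases n
    · unfold genAllRows genAllRows_alt; decide
    · unfold genAllRows genAllRows_alt; decide
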